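-- pv_equiv track=rewrite | github.com/kloia/document-anonymizer | src/document_anonymizer/anonymization_engine.py | _is_incompatible_type
-- ===== SOURCE A (Python) =====
-- def _is_incompatible_type(type1: str, type2: str) -> bool:
--     """Check if two field types are incompatible for matching."""
--     name_types = {"person_name", "company_name"}
--     id_types = {"national_id", "tax_id", "passport"}
--     contact_types = {"phone", "email"}
--
--     type1_category = None
--     type2_category = None
--
--     for cat, types in [("name", name_types), ("id", id_types), ("contact", contact_types)]:
--         if type1 in types:
--             type1_category = cat
--         if type2 in types:
--             type2_category = cat
--
--     # If both have categories and they're different, incompatible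
--     if type1_category and type2_category and type1_category != type2_category:
--         return True
--
--     return False
-- ===== SOURCE B (Python) =====
-- _CATEGORIES = [
--     {"person_name", "company_name"},
--     {"national_id", "tax_id", "passport"},
--     {"phone", "email"},
-- ]
--
-- # Precomputed relation: every ordered pair of known types drawn from two
-- # different categories is incompatible.
-- _INCOMPATIBLE_PAIRS = frozenset(
--     (a, b)
--     for i, cat_a in enumerate(_CATEGORIES)
--     for j, cat_b in enumerate(_CATEGORIES)
--     if i != j
--     for a in cat_a
--     for b in cat_b
-- )
--
--
-- def _is_incompatible_type(type1: str, type2: str) -> bool: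
--     """Check if two field types are incompatible for matching."""
--     return (type1, type2) in _INCOMPATIBLE_PAIRS
-- ===== Notes on version B (the rewrite author's own statement) =====
-- stated objective: alternative
-- what changed: Instead of labelling each argument with a category via a loop and comparing labels, B precomputes the finite relation of all incompatible (type, type) pairs (cross products of distinct categories) and answers with a single pair-membership test.
import Mathlib
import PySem

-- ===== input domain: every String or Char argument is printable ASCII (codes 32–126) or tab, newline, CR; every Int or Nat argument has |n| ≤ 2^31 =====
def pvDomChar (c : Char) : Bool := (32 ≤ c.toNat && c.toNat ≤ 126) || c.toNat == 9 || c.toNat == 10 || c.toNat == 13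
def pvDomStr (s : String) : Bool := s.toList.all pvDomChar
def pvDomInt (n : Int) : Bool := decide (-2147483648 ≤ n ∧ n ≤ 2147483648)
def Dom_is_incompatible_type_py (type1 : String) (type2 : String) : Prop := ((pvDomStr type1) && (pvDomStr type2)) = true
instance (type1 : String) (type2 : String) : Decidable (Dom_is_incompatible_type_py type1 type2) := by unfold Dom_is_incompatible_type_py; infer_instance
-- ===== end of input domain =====

-- B replaces A's per-argument categorization loop by a precomputed relation of incompatible
-- (type, type) pairs consulted with one membership test (alternative decomposition; same cost).
-- ===== PORT A =====
def is_incompatible_type_py (type1 : String) (type2 : String) : Bool :=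
  let name_types : PySem.Set String := PySem.Set.ofList ["person_name", "company_name"]
  let id_types : PySem.Set String := PySem.Set.ofList ["national_id", "tax_id", "passport"]
  let contact_types : PySem.Set String := PySem.Set.ofList ["phone", "email"]
  let st :=
    [("name", name_types), ("id", id_types), ("contact", contact_types)].foldl
      (fun (p : Option String × Option String) ct =>
        (if PySem.Set.contains ct.2 type1 then some ct.1 else p.1,
         if PySem.Set.contains ct.2 type2 then some ct.1 else p.2))
      (none, none)
  -- Python truthiness of an Optional[str]: None and "" are falsy
  if ((match st.1 with | none => false | some s => decide (s ≠ "")) &&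
      (match st.2 with | none => false | some s => decide (s ≠ "")) &&
      st.1 != st.2) then
    true
  else
    false

-- ===== PORT B =====
def pvCategories : List (PySem.Set String) :=
  [PySem.Set.ofList ["person_name", "company_name"],
   PySem.Set.ofList ["national_id", "tax_id", "passport"],
   PySem.Set.ofList ["phone", "email"]]

-- frozenset comprehension over enumerated category pairs (set iteration order is irrelevant:
-- the result is a set)
def pvIncompatiblePairs : PySem.Set (String × String) :=
  PySem.Set.ofList
    ((PySem.List.enumerate pvCategories 0).flatMap (fun ica =>
      (PySem.List.enumerate pvCategories 0).flatMap (fun jcb =>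
        if ica.1 ≠ jcb.1 then
          ica.2.flatMap (fun a => jcb.2.map (fun b => (a, b)))
        else [])))

def is_incompatible_type_py_alt (type1 : String) (type2 : String) : Bool :=
  PySem.Set.contains pvIncompatiblePairs (type1, type2)

-- ===== PRECONDITION & SPEC =====
def Spec_is_incompatible_type_py (type1 : String) (type2 : String) (out : Bool) : Prop := out = is_incompatible_type_py_alt type1 type2
instance (type1 : String) (type2 : String) (out : Bool) : Decidable (Spec_is_incompatible_type_py type1 type2 out) := by unfold Spec_is_incompatible_type_py; infer_instance

-- ===== CLAIM (what is proved, stated in full; the proofs are below) =====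
def Claim_equal_is_incompatible_type_py : Prop := ∀ (type1 : String) (type2 : String), Dom_is_incompatible_type_py type1 type2 → Spec_is_incompatible_type_py type1 type2 (is_incompatible_type_py type1 type2)

-- ===== LEMMAS AND PROOFS =====
-- Every string is one of the seven known type literals or none of them.
theorem pv_seven_cases (s : String) :
    s = "person_name" ∨ s = "company_name" ∨ s = "national_id" ∨ s = "tax_id" ∨
    s = "passport" ∨ s = "phone" ∨ s = "email" ∨
    (s ≠ "person_name" ∧ s ≠ "company_name" ∧ s ≠ "national_id" ∧ s ≠ "tax_id" ∧
     s ≠ "passport" ∧ s ≠ "phone" ∧ s ≠ "email") := by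
  by_cases h1 : s = "person_name"; · exact Or.inl h1
  by_cases h2 : s = "company_name"; · exact Or.inr (Or.inl h2)
  by_cases h3 : s = "national_id"; · exact Or.inr (Or.inr (Or.inl h3))
  by_cases h4 : s = "tax_id"; · exact Or.inr (Or.inr (Or.inr (Or.inl h4)))
  by_cases h5 : s = "passport"; · exact Or.inr (Or.inr (Or.inr (Or.inr (Or.inl h5))))
  by_cases h6 : s = "phone"; · exact Or.inr (Or.inr (Or.inr (Or.inr (Or.inr (Or.inl h6)))))
  by_cases h7 : s = "email"; · exact Or.inr (Or.inr (Or.inr (Or.inr (Or.inr (Or.inr (Or.inl h7))))))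
  exact Or.inr (Or.inr (Or.inr (Or.inr (Or.inr (Or.inr (Or.inr ⟨h1, h2, h3, h4, h5, h6, h7⟩))))))

-- The pair-set comprehension evaluates to this explicit 32-pair list.
theorem pv_pairs_eq : pvIncompatiblePairs =
    [("person_name", "national_id"), ("person_name", "tax_id"), ("person_name", "passport"),
     ("company_name", "national_id"), ("company_name", "tax_id"), ("company_name", "passport"),
     ("person_name", "phone"), ("person_name", "email"), ("company_name", "phone"),
     ("company_name", "email"), ("national_id", "person_name"), ("national_id", "company_name"),
     ("tax_id", "person_name"), ("tax_id", "company_name"), ("passport", "person_name"),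
     ("passport", "company_name"), ("national_id", "phone"), ("national_id", "email"),
     ("tax_id", "phone"), ("tax_id", "email"), ("passport", "phone"), ("passport", "email"),
     ("phone", "person_name"), ("phone", "company_name"), ("email", "person_name"),
     ("email", "company_name"), ("phone", "national_id"), ("phone", "tax_id"),
     ("phone", "passport"), ("email", "national_id"), ("email", "tax_id"), ("email", "passport")] := by
  decide

-- ===== VERDICT (by name: the statement is the Claim_ definition above) =====
set_option maxHeartbeats 1000000 in
theorem is_incompatible_type_py_spec : Claim_equal_is_incompatible_type_py := by
  intro t1 t2 _
  unfold Spec_is_incompatible_type_py is_incompatible_type_py is_incompatible_type_py_alt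
  rw [pv_pairs_eq]
  rcases pv_seven_cases t1 with rfl | rfl | rfl | rfl | rfl | rfl | rfl | ⟨a1, a2, a3, a4, a5, a6, a7⟩ <;>
    rcases pv_seven_cases t2 with rfl | rfl | rfl | rfl | rfl | rfl | rfl | ⟨b1, b2, b3, b4, b5, b6, b7⟩ <;>
    first
      | decide
      | simp_all [PySem.Set.contains, PySem.Set.ofList, PySem.Set.add, PySem.Set.empty,
          List.foldl, List.mem_cons, Prod.ext_iff]
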